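-- pv_equiv track=rewrite | github.com/msorbi/hdsner-utils | src/sentence_split.py | merge_iob_labels
-- ===== SOURCE A (Python) =====
-- def merge_iob_labels(tokens, pers_labels, loc_labels):
--     """
--     Merge two IOB label sequences (PERS and LOC) into a single sequence based on specified rules.
--
--     Parameters:
--     - tokens: List of token strings.
--     - pers_labels: List of IOB labels for the PERS class.
--     - loc_labels: List of IOB labels for the LOC class.
--
--     Returns:
--     - merged_labels: List of merged IOB labels.
--     """
--     n = len(tokens)
--     merged_labels = ['O'] * n
--     i = 0
--
--     while i < n:
--         # Determine if a PERS span starts at position i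
--         if pers_labels[i].startswith('B-'):
--             pers_start = i
--             pers_end = i + 1
--             while pers_end < n and pers_labels[pers_end].startswith('I-'):
--                 pers_end += 1
--         else:
--             pers_start = pers_end = None
--
--         # Determine if a LOC span starts at position i
--         if loc_labels[i].startswith('B-'):
--             loc_start = i
--             loc_end = i + 1
--             while loc_end < n and loc_labels[loc_end].startswith('I-'):
--                 loc_end += 1
--         else:
--             loc_start = loc_end = None
--
--         # Decide which span to select based on the rules
--         if pers_start is not None and loc_start is not None:
--             if pers_start < loc_start:
--                 selected_start, selected_end, selected_type = pers_start, pers_end, 'PERS'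
--             elif loc_start < pers_start:
--                 selected_start, selected_end, selected_type = loc_start, loc_end, 'LOC'
--             else:  # Starts are equal
--                 pers_length = pers_end - pers_start
--                 loc_length = loc_end - loc_start
--                 if pers_length > loc_length:
--                     selected_start, selected_end, selected_type = pers_start, pers_end, 'PERS'
--                 elif loc_length > pers_length:
--                     selected_start, selected_end, selected_type = loc_start, loc_end, 'LOC'
--                 else:
--                     selected_start, selected_end, selected_type = pers_start, pers_end, 'PERS'
--         elif pers_start is not None:
--             selected_start, selected_end, selected_type = pers_start, pers_end, 'PERS'
--         elif loc_start is not None: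
--             selected_start, selected_end, selected_type = loc_start, loc_end, 'LOC'
--         else:
--             i += 1
--             continue
--
--         # Assign labels to the merged sequence
--         merged_labels[selected_start] = f'B-{selected_type}'
--         for j in range(selected_start + 1, selected_end):
--             merged_labels[j] = f'I-{selected_type}'
--
--         # Advance the index to the end of the selected span
--         i = selected_end
--
--     return merged_labels
-- ===== SOURCE B (Python) =====
-- def _span_ends(labels, n):
--     """One linear scan over labels[:n]: dict mapping each 'B-' start index to the
--     position just past its trailing run of 'I-' labels."""
--     ends = {}
--     current = None
--     j = 0
--     while j < n:
--         lab = labels[j]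
--         if lab.startswith('B-'):
--             ends[j] = j + 1
--             current = j
--         elif current is not None and lab.startswith('I-'):
--             ends[current] = j + 1
--         else:
--             current = None
--         j += 1
--     return ends
--
--
-- def merge_iob_labels(tokens, pers_labels, loc_labels):
--     n = len(tokens)
--     pers = _span_ends(pers_labels, n)
--     loc = _span_ends(loc_labels, n)
--     out = []
--     i = 0
--     while i < n:
--         pe = pers.get(i)
--         le = loc.get(i)
--         if pe is not None and (le is None or pe >= le):
--             out.append('B-PERS')
--             out.extend(['I-PERS'] * (pe - i - 1))
--             i = pe
--         elif le is not None:
--             out.append('B-LOC')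
--             out.extend(['I-LOC'] * (le - i - 1))
--             i = le
--         else:
--             out.append('O')
--             i += 1
--     return out
-- ===== Notes on version B (the rewrite author's own statement) =====
-- stated objective: alternative
-- what changed: B first extracts all B-/I- spans of each label list into a start->end dict in one linear helper pass, then the merge walk appends output labels using dict lookups instead of A's inline inner while-scans and in-place painting of a preallocated 'O' list.
import Mathlib
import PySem

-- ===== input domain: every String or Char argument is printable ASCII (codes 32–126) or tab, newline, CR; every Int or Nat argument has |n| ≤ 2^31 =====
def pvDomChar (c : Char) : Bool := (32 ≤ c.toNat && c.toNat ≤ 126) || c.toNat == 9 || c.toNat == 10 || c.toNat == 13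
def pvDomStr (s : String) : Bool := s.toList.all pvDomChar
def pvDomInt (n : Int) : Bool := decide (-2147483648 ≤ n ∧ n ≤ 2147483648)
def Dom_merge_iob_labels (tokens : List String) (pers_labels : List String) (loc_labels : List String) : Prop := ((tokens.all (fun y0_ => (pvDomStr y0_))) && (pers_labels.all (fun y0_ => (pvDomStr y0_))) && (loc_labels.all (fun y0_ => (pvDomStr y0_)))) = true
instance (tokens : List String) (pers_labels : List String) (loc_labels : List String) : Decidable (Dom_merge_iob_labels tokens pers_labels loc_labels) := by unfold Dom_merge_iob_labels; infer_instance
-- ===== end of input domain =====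

-- B replaces A's inline inner while-scans and in-place painting of a preallocated 'O' list
-- by a one-pass start→end span-dictionary per label list plus an output-appending merge walk
-- (objective: alternative decomposition, same asymptotic cost).

-- ===== PORT A =====
-- inner while:  while pers_end < n and labels[pers_end].startswith('I-'): pers_end += 1
-- (labels.getD e "" = labels[e]; exact for 0 ≤ e < len(labels), which Pre_ guarantees for e < n)
def pvRunEnd (labels : List String) (n : Nat) (e : Nat) : Nat :=
  if h : e < n ∧ PySem.Str.startswith (labels.getD e "") "I-" = true then
    pvRunEnd labels n (e + 1)
  else e
termination_by n - e
decreasing_by omega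

-- cited by pvALoop's decreasing_by
theorem pvRunEnd_ge (labels : List String) (n e : Nat) : e ≤ pvRunEnd labels n e := by
  induction e using pvRunEnd.induct labels n with
  | case1 e h ih => rw [pvRunEnd]; simp only [h]; exact le_trans (Nat.le_succ e) ih
  | case2 e h => rw [pvRunEnd]; simp only [h, dite_false]; exact Nat.le_refl e

-- merged[start] = f'B-{t}'; for j in range(start+1, end): merged[j] = f'I-{t}'
-- (the f-strings are folded to the literal each branch selects; List.set = in-range merged[j] = v)
def pvPaint (merged : List String) (s e : Nat) (bl il : String) : List String :=
  (PySem.List.pyRange ((s : Int) + 1) (e : Int) 1).foldl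
    (fun m j => m.set j.toNat il) (merged.set s bl)

-- the main while loop of A; pers_start = loc_start = i whenever set, so the
-- 'pers_start < loc_start' branches are transliterated as 'i < i'
def pvALoop (pers loc : List String) (n i : Nat) (merged : List String) : List String :=
  if hi : i < n then
    if PySem.Str.startswith (pers.getD i "") "B-" then
      if PySem.Str.startswith (loc.getD i "") "B-" then
        if i < i then
          pvALoop pers loc n (pvRunEnd pers n (i + 1)) (pvPaint merged i (pvRunEnd pers n (i + 1)) "B-PERS" "I-PERS")
        else if i < i then
          pvALoop pers loc n (pvRunEnd loc n (i + 1)) (pvPaint merged i (pvRunEnd loc n (i + 1)) "B-LOC" "I-LOC")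
        else if pvRunEnd pers n (i + 1) - i > pvRunEnd loc n (i + 1) - i then
          pvALoop pers loc n (pvRunEnd pers n (i + 1)) (pvPaint merged i (pvRunEnd pers n (i + 1)) "B-PERS" "I-PERS")
        else if pvRunEnd loc n (i + 1) - i > pvRunEnd pers n (i + 1) - i then
          pvALoop pers loc n (pvRunEnd loc n (i + 1)) (pvPaint merged i (pvRunEnd loc n (i + 1)) "B-LOC" "I-LOC")
        else
          pvALoop pers loc n (pvRunEnd pers n (i + 1)) (pvPaint merged i (pvRunEnd pers n (i + 1)) "B-PERS" "I-PERS")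
      else
        pvALoop pers loc n (pvRunEnd pers n (i + 1)) (pvPaint merged i (pvRunEnd pers n (i + 1)) "B-PERS" "I-PERS")
    else
      if PySem.Str.startswith (loc.getD i "") "B-" then
        pvALoop pers loc n (pvRunEnd loc n (i + 1)) (pvPaint merged i (pvRunEnd loc n (i + 1)) "B-LOC" "I-LOC")
      else
        pvALoop pers loc n (i + 1) merged
  else merged
termination_by n - i
decreasing_by
  · have := pvRunEnd_ge pers n (i + 1); omega
  · have := pvRunEnd_ge loc n (i + 1); omega
  · have := pvRunEnd_ge pers n (i + 1); omega
  · have := pvRunEnd_ge loc n (i + 1); omega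
  · have := pvRunEnd_ge pers n (i + 1); omega
  · have := pvRunEnd_ge pers n (i + 1); omega
  · have := pvRunEnd_ge loc n (i + 1); omega
  · omega

def merge_iob_labels (tokens : List String) (pers_labels : List String) (loc_labels : List String) : List String :=
  pvALoop pers_labels loc_labels tokens.length 0 (List.replicate tokens.length "O")

-- ===== PORT B =====
-- _span_ends' while loop (labels.getD j "" = labels[j]; exact for j < n ≤ len(labels))
def pvSpanLoop (labels : List String) (n j : Nat) (ends : PySem.Dict Nat Nat) (cur : Option Nat) : PySem.Dict Nat Nat :=
  if j < n then
    if PySem.Str.startswith (labels.getD j "") "B-" then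
      pvSpanLoop labels n (j + 1) (ends.insert j (j + 1)) (some j)
    else
      match cur with
      | some c =>
        if PySem.Str.startswith (labels.getD j "") "I-" then
          pvSpanLoop labels n (j + 1) (ends.insert c (j + 1)) (some c)
        else pvSpanLoop labels n (j + 1) ends none
      | none => pvSpanLoop labels n (j + 1) ends none
  else ends
termination_by n - j
decreasing_by all_goals omega

def pvSpanEnds (labels : List String) (n : Nat) : PySem.Dict Nat Nat :=
  pvSpanLoop labels n 0 PySem.Dict.empty none

-- the merge while loop of Source B, appending to out.
-- 'max pe (i+1)' is a termination guard only: every span end pvSpanLoop records exceeds its start.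
def pvBLoop (n : Nat) (pers loc : PySem.Dict Nat Nat) (i : Nat) (out : List String) : List String :=
  if i < n then
    match pers.get? i, loc.get? i with
    | some pe, some le =>
      if pe ≥ le then
        pvBLoop n pers loc (max pe (i + 1)) (out ++ "B-PERS" :: List.replicate (pe - i - 1) "I-PERS")
      else
        pvBLoop n pers loc (max le (i + 1)) (out ++ "B-LOC" :: List.replicate (le - i - 1) "I-LOC")
    | some pe, none =>
      pvBLoop n pers loc (max pe (i + 1)) (out ++ "B-PERS" :: List.replicate (pe - i - 1) "I-PERS")
    | none, some le =>
      pvBLoop n pers loc (max le (i + 1)) (out ++ "B-LOC" :: List.replicate (le - i - 1) "I-LOC")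
    | none, none => pvBLoop n pers loc (i + 1) (out ++ ["O"])
  else out
termination_by n - i
decreasing_by all_goals omega

def merge_iob_labels_alt (tokens : List String) (pers_labels : List String) (loc_labels : List String) : List String :=
  pvBLoop tokens.length (pvSpanEnds pers_labels tokens.length) (pvSpanEnds loc_labels tokens.length) 0 []

-- ===== PRECONDITION & SPEC =====
-- Pre_ excludes label lists shorter than tokens: there Python A raises IndexError on most
-- inputs (which indices it touches is data-dependent), and B's extraction pass raises likewise.
def Pre_merge_iob_labels (tokens : List String) (pers_labels : List String) (loc_labels : List String) : Prop :=
  tokens.length ≤ pers_labels.length ∧ tokens.length ≤ loc_labels.length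
instance (tokens : List String) (pers_labels : List String) (loc_labels : List String) : Decidable (Pre_merge_iob_labels tokens pers_labels loc_labels) := by unfold Pre_merge_iob_labels; infer_instance

def pvWitness_merge_iob_labels : List String × List String × List String :=
  (["John", "went", "home"], ["B-PERS", "I-PERS", "O"], ["O", "O", "B-LOC"])

def Spec_merge_iob_labels (tokens : List String) (pers_labels : List String) (loc_labels : List String) (out : List String) : Prop := out = merge_iob_labels_alt tokens pers_labels loc_labels
instance (tokens : List String) (pers_labels : List String) (loc_labels : List String) (out : List String) : Decidable (Spec_merge_iob_labels tokens pers_labels loc_labels out) := by unfold Spec_merge_iob_labels; infer_instance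

-- ===== CLAIM (what is proved, stated in full; the proofs are below) =====
def Claim_equal_merge_iob_labels : Prop := ∀ (tokens : List String) (pers_labels : List String) (loc_labels : List String), Dom_merge_iob_labels tokens pers_labels loc_labels → Pre_merge_iob_labels tokens pers_labels loc_labels → Spec_merge_iob_labels tokens pers_labels loc_labels (merge_iob_labels tokens pers_labels loc_labels)

-- ===== LEMMAS AND PROOFS =====

theorem pvRunEnd_le (labels : List String) (n : Nat) : ∀ e, e ≤ n → pvRunEnd labels n e ≤ n := by
  intro e
  induction e using pvRunEnd.induct labels n with
  | case1 e hc ih => intro _; rw [pvRunEnd]; simp only [hc]; exact ih (by omega)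
  | case2 e hc => intro h; rw [pvRunEnd]; simp only [hc, dite_false]; exact h

theorem pvRunEnd_stop (labels : List String) (n e : Nat)
    (h : ¬ (e < n ∧ PySem.Str.startswith (labels.getD e "") "I-" = true)) :
    pvRunEnd labels n e = e := by
  rw [pvRunEnd]; simp only [h, dite_false]

-- every position strictly inside the run is an 'I-' label
theorem pvRunEnd_all_I (labels : List String) (n : Nat) : ∀ e,
    ∀ k, e ≤ k → k < pvRunEnd labels n e → PySem.Str.startswith (labels.getD k "") "I-" = true := by
  intro e
  induction e using pvRunEnd.induct labels n with
  | case1 e hc ih =>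
    intro k hk1 hk2
    rw [pvRunEnd, dif_pos hc] at hk2
    rcases Nat.eq_or_lt_of_le hk1 with rfl | hlt
    · exact hc.2
    · exact ih k hlt hk2
  | case2 e hc =>
    intro k hk1 hk2
    rw [pvRunEnd_stop labels n e hc] at hk2
    omega

-- one more column: the run over [e, j+1) extends the run over [e, j) iff that run reached j and labels[j] is 'I-'
theorem pvRunEnd_step (labels : List String) (n e : Nat) :
    pvRunEnd labels n e =
      if e < n ∧ PySem.Str.startswith (labels.getD e "") "I-" = true
      then pvRunEnd labels n (e + 1) else e := by
  rw [pvRunEnd]; split_ifs with h <;> rfl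

theorem pvRunEnd_succ (labels : List String) (j : Nat) : ∀ e, e ≤ j →
    pvRunEnd labels (j + 1) e =
      (if pvRunEnd labels j e = j ∧ PySem.Str.startswith (labels.getD j "") "I-" = true
      then j + 1 else pvRunEnd labels j e) := by
  intro e
  induction e using pvRunEnd.induct labels j with
  | case1 e hc ih =>
    intro he
    rw [pvRunEnd_step labels (j + 1) e, pvRunEnd_step labels j e,
      if_pos (show e < j + 1 ∧ _ from ⟨by omega, hc.2⟩), if_pos hc]
    exact ih (by omega)
  | case2 e hc =>
    intro he
    rw [pvRunEnd_step labels j e, if_neg hc]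
    by_cases hej : e = j
    · subst hej
      by_cases hI : PySem.Str.startswith (labels.getD e "") "I-" = true
      · rw [pvRunEnd_step labels (e + 1) e, if_pos ⟨by omega, hI⟩,
          pvRunEnd_stop labels (e + 1) (e + 1) (by omega), if_pos ⟨rfl, hI⟩]
      · rw [pvRunEnd_step labels (e + 1) e, if_neg (fun h => hI h.2), if_neg (fun h => hI h.2)]
    · have helt : e < j := by omega
      have hnI : ¬ PySem.Str.startswith (labels.getD e "") "I-" = true := fun hI => hc ⟨helt, hI⟩
      rw [pvRunEnd_step labels (j + 1) e, if_neg (fun h => hnI h.2), if_neg (fun h => hej h.1)]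

def pvEndSpec (labels : List String) (k s : Nat) : Option Nat :=
  if s < k ∧ PySem.Str.startswith (labels.getD s "") "B-" = true
  then some (pvRunEnd labels k (s + 1)) else none

def pvCurInv (labels : List String) (j : Nat) (cur : Option Nat) : Prop :=
  match cur with
  | some c => c < j ∧ PySem.Str.startswith (labels.getD c "") "B-" = true ∧ pvRunEnd labels j (c + 1) = j
  | none => ∀ c, c < j → PySem.Str.startswith (labels.getD c "") "B-" = true → pvRunEnd labels j (c + 1) ≠ j

theorem pv_not_B_and_I (s : String) :
    PySem.Str.startswith s "B-" = true → PySem.Str.startswith s "I-" = true → False := by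
  intro h1 h2
  rw [PySem.Str.startswith_eq, PySem.Chars.startswith_iff,
    show ("B-" : String).toList = ['B', '-'] from rfl] at h1
  rw [PySem.Str.startswith_eq, PySem.Chars.startswith_iff,
    show ("I-" : String).toList = ['I', '-'] from rfl] at h2
  obtain ⟨t1, ht1⟩ := h1
  obtain ⟨t2, ht2⟩ := h2
  rw [← ht1] at ht2
  simp at ht2

theorem pvRun_uniq (labels : List String) (j s c : Nat) (hs : s < j) (hc : c < j)
    (hBs : PySem.Str.startswith (labels.getD s "") "B-" = true)
    (hBc : PySem.Str.startswith (labels.getD c "") "B-" = true)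
    (hrs : pvRunEnd labels j (s + 1) = j) (hrc : pvRunEnd labels j (c + 1) = j) : s = c := by
  rcases Nat.lt_trichotomy s c with h | h | h
  · exact absurd (pvRunEnd_all_I labels j (s + 1) c (by omega) (by rw [hrs]; exact hc))
      (fun hI => pv_not_B_and_I _ hBc hI)
  · exact h
  · exact absurd (pvRunEnd_all_I labels j (c + 1) s (by omega) (by rw [hrc]; exact hs))
      (fun hI => pv_not_B_and_I _ hBs hI)

theorem pvEndSpec_succ_of (labels : List String) (j s : Nat) (hs : s ≠ j)
    (h : PySem.Str.startswith (labels.getD j "") "I-" = true → s < j →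
         PySem.Str.startswith (labels.getD s "") "B-" = true → pvRunEnd labels j (s + 1) ≠ j) :
    pvEndSpec labels (j + 1) s = pvEndSpec labels j s := by
  unfold pvEndSpec
  by_cases h1 : s < j ∧ PySem.Str.startswith (labels.getD s "") "B-" = true
  · rw [if_pos (show s < j + 1 ∧ _ from ⟨by omega, h1.2⟩), if_pos h1,
      pvRunEnd_succ labels j (s + 1) (by omega)]
    rw [if_neg]
    rintro ⟨hr, hI⟩
    exact h hI h1.1 h1.2 hr
  · rw [if_neg (fun hx => h1 ⟨by omega, hx.2⟩), if_neg h1]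

theorem pvSpanLoop_spec (labels : List String) (n : Nat) :
    ∀ j ends cur, j ≤ n →
      (∀ s, PySem.Dict.get? ends s = pvEndSpec labels j s) →
      pvCurInv labels j cur →
      ∀ s, PySem.Dict.get? (pvSpanLoop labels n j ends cur) s = pvEndSpec labels n s := by
  intro j ends cur
  induction j, ends, cur using pvSpanLoop.induct labels n with
  | case1 j ends cur hj hB ih =>
    intro hjn hspec hcur s
    rw [pvSpanLoop.eq_def, if_pos hj, if_pos hB]
    refine ih (by omega) ?_ ?_ s
    · intro s'
      rw [PySem.Dict.get?_insert]
      split_ifs with hsj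
      · subst hsj
        unfold pvEndSpec
        rw [if_pos (show s' < s' + 1 ∧ _ from ⟨by omega, hB⟩),
          pvRunEnd_stop labels (s' + 1) (s' + 1) (by omega)]
      · rw [hspec s', pvEndSpec_succ_of labels j s' hsj]
        intro hI _ _
        exact absurd hI (fun hI' => pv_not_B_and_I _ hB hI')
    · exact ⟨by omega, hB, pvRunEnd_stop labels (j + 1) (j + 1) (by omega)⟩
  | case2 j ends hj hB c hI ih =>
    intro hjn hspec hcur s
    obtain ⟨hcj, hBc, hrc⟩ := hcur
    rw [pvSpanLoop.eq_def, if_pos hj, if_neg hB]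
    simp only [if_pos hI]
    refine ih (by omega) ?_ ?_ s
    · intro s'
      rw [PySem.Dict.get?_insert]
      split_ifs with hsc
      · subst hsc
        unfold pvEndSpec
        rw [if_pos (show s' < j + 1 ∧ _ from ⟨by omega, hBc⟩),
          pvRunEnd_succ labels j (s' + 1) (by omega), if_pos ⟨hrc, hI⟩]
      · by_cases hsj : s' = j
        · subst hsj
          rw [hspec _]
          simp only [pvEndSpec]
          rw [if_neg (show ¬(s' < s' ∧ PySem.Str.startswith (labels.getD s' "") "B-" = true) from
                fun hx => Nat.lt_irrefl _ hx.1),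
            if_neg (show ¬(s' < s' + 1 ∧ PySem.Str.startswith (labels.getD s' "") "B-" = true) from
                fun hx => hB hx.2)]
        · rw [hspec s', pvEndSpec_succ_of labels j s' hsj]
          intro hI' hlt hBs hrs
          exact hsc (pvRun_uniq labels j s' c hlt hcj hBs hBc hrs hrc)
    · exact ⟨by omega, hBc, by
        rw [pvRunEnd_succ labels j (c + 1) (by omega), if_pos ⟨hrc, hI⟩]⟩
  | case3 j ends hj hB c hI ih =>
    intro hjn hspec hcur s
    rw [pvSpanLoop.eq_def, if_pos hj, if_neg hB]
    simp only [if_neg hI]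
    refine ih (by omega) ?_ ?_ s
    · intro s'
      by_cases hsj : s' = j
      · subst hsj
        rw [hspec _]
        simp only [pvEndSpec]
        rw [if_neg (show ¬(s' < s' ∧ PySem.Str.startswith (labels.getD s' "") "B-" = true) from
              fun hx => Nat.lt_irrefl _ hx.1),
          if_neg (show ¬(s' < s' + 1 ∧ PySem.Str.startswith (labels.getD s' "") "B-" = true) from
              fun hx => hB hx.2)]
      · rw [hspec s', pvEndSpec_succ_of labels j s' hsj]
        intro hI' hlt hBs
        exact absurd hI' hI
    · intro c' hc' hBc'
      by_cases hcj' : c' = j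
      · subst hcj'
        exact absurd hBc' hB
      · rw [pvRunEnd_succ labels j (c' + 1) (by omega), if_neg (fun hx => hI hx.2)]
        have := pvRunEnd_le labels j (c' + 1) (by omega)
        omega
  | case4 j ends hj hB ih =>
    intro hjn hspec hcur s
    rw [pvSpanLoop.eq_def, if_pos hj, if_neg hB]
    refine ih (by omega) ?_ ?_ s
    · intro s'
      by_cases hsj : s' = j
      · subst hsj
        rw [hspec _]
        simp only [pvEndSpec]
        rw [if_neg (show ¬(s' < s' ∧ PySem.Str.startswith (labels.getD s' "") "B-" = true) from
              fun hx => Nat.lt_irrefl _ hx.1),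
          if_neg (show ¬(s' < s' + 1 ∧ PySem.Str.startswith (labels.getD s' "") "B-" = true) from
              fun hx => hB hx.2)]
      · rw [hspec s', pvEndSpec_succ_of labels j s' hsj]
        intro hI' hlt hBs
        exact hcur s' hlt hBs
    · intro c' hc' hBc'
      by_cases hcj' : c' = j
      · subst hcj'
        exact absurd hBc' hB
      · rw [pvRunEnd_succ labels j (c' + 1) (by omega)]
        split_ifs with hx
        · exact absurd hx.1 (hcur c' (by omega) hBc')
        · have := pvRunEnd_le labels j (c' + 1) (by omega)
          omega
  | case5 j ends cur hj =>
    intro hjn hspec hcur s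
    have hje : j = n := by omega
    subst hje
    rw [pvSpanLoop.eq_def, if_neg hj]
    exact hspec s

theorem pvSpanEnds_get? (labels : List String) (n s : Nat) :
    PySem.Dict.get? (pvSpanEnds labels n) s = pvEndSpec labels n s := by
  apply pvSpanLoop_spec labels n 0 _ _ (Nat.zero_le n)
  · intro s; simp [pvEndSpec, PySem.Dict.get?_empty]
  · intro c hc; omega

theorem pvPaintFold (out : List String) (n : Nat) (bl il : String) :
    ∀ e, out.length + 1 ≤ e → e ≤ n →
    (PySem.List.pyRange ((out.length : Int) + 1) ((e : Nat) : Int) 1).foldl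
        (fun m j => m.set j.toNat il) (out ++ bl :: List.replicate (n - out.length - 1) "O")
      = out ++ bl :: (List.replicate (e - out.length - 1) il ++ List.replicate (n - e) "O") := by
  intro e he
  induction e, he using Nat.le_induction with
  | base =>
    intro hen
    rw [show ((out.length + 1 : Nat) : Int) = (out.length : Int) + 1 by push_cast; ring,
      PySem.List.pyRange_one_eq_nil (by omega)]
    simp
    omega
  | succ e he ih =>
    intro hen
    rw [show ((e + 1 : Nat) : Int) = (e : Int) + 1 by push_cast; ring,
      PySem.List.pyRange_one_succ_right (by exact_mod_cast Nat.succ_le_of_lt (by omega)),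
      List.foldl_append, ih (by omega)]
    simp only [List.foldl_cons, List.foldl_nil, Int.toNat_natCast]
    rw [show out ++ bl :: (List.replicate (e - out.length - 1) il ++ List.replicate (n - e) "O")
        = (out ++ bl :: List.replicate (e - out.length - 1) il) ++ List.replicate (n - e) "O" by
        simp [List.append_assoc]]
    rw [List.set_append]
    have hlen : (out ++ bl :: List.replicate (e - out.length - 1) il).length = e := by
      simp; omega
    rw [hlen, if_neg (Nat.lt_irrefl e), Nat.sub_self,
      show n - e = (n - (e + 1)) + 1 by omega, List.replicate_succ, List.set_cons_zero,
      show e + 1 - out.length - 1 = (e - out.length - 1) + 1 by omega, List.replicate_succ']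
    simp [List.append_assoc]

theorem pvPaint_spec (out : List String) (n e : Nat) (bl il : String)
    (h1 : out.length < e) (h2 : e ≤ n) :
    pvPaint (out ++ List.replicate (n - out.length) "O") out.length e bl il
      = out ++ bl :: (List.replicate (e - out.length - 1) il ++ List.replicate (n - e) "O") := by
  unfold pvPaint
  rw [List.set_append, if_neg (Nat.lt_irrefl out.length), Nat.sub_self,
    show n - out.length = (n - out.length - 1) + 1 by omega, List.replicate_succ,
    List.set_cons_zero]
  exact pvPaintFold out n bl il e h1 h2

theorem pvLoop_eq (pers loc : List String) (n : Nat) :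
    ∀ m i out, n - i = m → i ≤ n → out.length = i →
      pvALoop pers loc n i (out ++ List.replicate (n - i) "O")
        = pvBLoop n (pvSpanEnds pers n) (pvSpanEnds loc n) i out := by
  intro m
  induction m using Nat.strong_induction_on with
  | _ m ih =>
    intro i out hm hin hlen
    subst hlen
    by_cases hi : out.length < n
    · have hP := pvSpanEnds_get? pers n out.length
      have hL := pvSpanEnds_get? loc n out.length
      rw [pvALoop.eq_def, dif_pos hi, pvBLoop.eq_def, if_pos hi, hP, hL]
      by_cases hbp : PySem.Str.startswith (pers.getD out.length "") "B-" = true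
      · have hpe1 : out.length + 1 ≤ pvRunEnd pers n (out.length + 1) :=
          pvRunEnd_ge pers n (out.length + 1)
        have hpe2 : pvRunEnd pers n (out.length + 1) ≤ n :=
          pvRunEnd_le pers n (out.length + 1) (by omega)
        rw [if_pos hbp,
          show pvEndSpec pers n out.length = some (pvRunEnd pers n (out.length + 1)) from by
            simp only [pvEndSpec]; rw [if_pos ⟨hi, hbp⟩]]
        by_cases hbl : PySem.Str.startswith (loc.getD out.length "") "B-" = true
        · have hle1 : out.length + 1 ≤ pvRunEnd loc n (out.length + 1) :=
            pvRunEnd_ge loc n (out.length + 1)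
          have hle2 : pvRunEnd loc n (out.length + 1) ≤ n :=
            pvRunEnd_le loc n (out.length + 1) (by omega)
          rw [if_pos hbl,
            show pvEndSpec loc n out.length = some (pvRunEnd loc n (out.length + 1)) from by
              simp only [pvEndSpec]; rw [if_pos ⟨hi, hbl⟩]]
          simp only [if_neg (Nat.lt_irrefl out.length)]
          by_cases hge : pvRunEnd loc n (out.length + 1) ≤ pvRunEnd pers n (out.length + 1)
          · have hA :
                (if pvRunEnd pers n (out.length + 1) - out.length >
                    pvRunEnd loc n (out.length + 1) - out.length then
                  pvALoop pers loc n (pvRunEnd pers n (out.length + 1))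
                    (pvPaint (out ++ List.replicate (n - out.length) "O") out.length
                      (pvRunEnd pers n (out.length + 1)) "B-PERS" "I-PERS")
                else if pvRunEnd loc n (out.length + 1) - out.length >
                    pvRunEnd pers n (out.length + 1) - out.length then
                  pvALoop pers loc n (pvRunEnd loc n (out.length + 1))
                    (pvPaint (out ++ List.replicate (n - out.length) "O") out.length
                      (pvRunEnd loc n (out.length + 1)) "B-LOC" "I-LOC")
                else
                  pvALoop pers loc n (pvRunEnd pers n (out.length + 1))
                    (pvPaint (out ++ List.replicate (n - out.length) "O") out.length
                      (pvRunEnd pers n (out.length + 1)) "B-PERS" "I-PERS"))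
                = pvALoop pers loc n (pvRunEnd pers n (out.length + 1))
                    (pvPaint (out ++ List.replicate (n - out.length) "O") out.length
                      (pvRunEnd pers n (out.length + 1)) "B-PERS" "I-PERS") := by
              by_cases h : pvRunEnd pers n (out.length + 1) - out.length >
                  pvRunEnd loc n (out.length + 1) - out.length
              · rw [if_pos h]
              · rw [if_neg h, if_neg (by omega)]
            rw [hA, if_pos hge, pvPaint_spec out n (pvRunEnd pers n (out.length + 1))
              "B-PERS" "I-PERS" (by omega) hpe2, Nat.max_eq_left hpe1,
              show out ++ "B-PERS" ::
                  (List.replicate (pvRunEnd pers n (out.length + 1) - out.length - 1) "I-PERS" ++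
                    List.replicate (n - pvRunEnd pers n (out.length + 1)) "O")
                = (out ++ "B-PERS" ::
                    List.replicate (pvRunEnd pers n (out.length + 1) - out.length - 1) "I-PERS") ++
                    List.replicate (n - pvRunEnd pers n (out.length + 1)) "O" from by simp]
            · exact ih (n - pvRunEnd pers n (out.length + 1)) (by omega)
                (pvRunEnd pers n (out.length + 1)) _ rfl hpe2 (by simp; omega)
          · have hA : ¬ (pvRunEnd pers n (out.length + 1) - out.length >
                pvRunEnd loc n (out.length + 1) - out.length) := by omega
            rw [if_neg hA, if_pos (by omega), if_neg (by omega),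
              pvPaint_spec out n (pvRunEnd loc n (out.length + 1)) "B-LOC" "I-LOC"
                (by omega) hle2, Nat.max_eq_left hle1,
              show out ++ "B-LOC" ::
                  (List.replicate (pvRunEnd loc n (out.length + 1) - out.length - 1) "I-LOC" ++
                    List.replicate (n - pvRunEnd loc n (out.length + 1)) "O")
                = (out ++ "B-LOC" ::
                    List.replicate (pvRunEnd loc n (out.length + 1) - out.length - 1) "I-LOC") ++
                    List.replicate (n - pvRunEnd loc n (out.length + 1)) "O" from by simp]
            exact ih (n - pvRunEnd loc n (out.length + 1)) (by omega)
              (pvRunEnd loc n (out.length + 1)) _ rfl hle2 (by simp; omega)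
        · rw [if_neg hbl,
            show pvEndSpec loc n out.length = none from by
              simp only [pvEndSpec]; rw [if_neg (fun hx => hbl hx.2)]]
          simp only []
          rw [pvPaint_spec out n (pvRunEnd pers n (out.length + 1)) "B-PERS" "I-PERS"
              (by omega) hpe2, Nat.max_eq_left hpe1,
            show out ++ "B-PERS" ::
                (List.replicate (pvRunEnd pers n (out.length + 1) - out.length - 1) "I-PERS" ++
                  List.replicate (n - pvRunEnd pers n (out.length + 1)) "O")
              = (out ++ "B-PERS" ::
                  List.replicate (pvRunEnd pers n (out.length + 1) - out.length - 1) "I-PERS") ++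
                  List.replicate (n - pvRunEnd pers n (out.length + 1)) "O" from by simp]
          exact ih (n - pvRunEnd pers n (out.length + 1)) (by omega)
            (pvRunEnd pers n (out.length + 1)) _ rfl hpe2 (by simp; omega)
      · rw [if_neg hbp,
          show pvEndSpec pers n out.length = none from by
            simp only [pvEndSpec]; rw [if_neg (fun hx => hbp hx.2)]]
        by_cases hbl : PySem.Str.startswith (loc.getD out.length "") "B-" = true
        · have hle1 : out.length + 1 ≤ pvRunEnd loc n (out.length + 1) :=
            pvRunEnd_ge loc n (out.length + 1)
          have hle2 : pvRunEnd loc n (out.length + 1) ≤ n :=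
            pvRunEnd_le loc n (out.length + 1) (by omega)
          rw [if_pos hbl,
            show pvEndSpec loc n out.length = some (pvRunEnd loc n (out.length + 1)) from by
              simp only [pvEndSpec]; rw [if_pos ⟨hi, hbl⟩]]
          simp only []
          rw [pvPaint_spec out n (pvRunEnd loc n (out.length + 1)) "B-LOC" "I-LOC"
              (by omega) hle2, Nat.max_eq_left hle1,
            show out ++ "B-LOC" ::
                (List.replicate (pvRunEnd loc n (out.length + 1) - out.length - 1) "I-LOC" ++
                  List.replicate (n - pvRunEnd loc n (out.length + 1)) "O")
              = (out ++ "B-LOC" ::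
                  List.replicate (pvRunEnd loc n (out.length + 1) - out.length - 1) "I-LOC") ++
                  List.replicate (n - pvRunEnd loc n (out.length + 1)) "O" from by simp]
          exact ih (n - pvRunEnd loc n (out.length + 1)) (by omega)
            (pvRunEnd loc n (out.length + 1)) _ rfl hle2 (by simp; omega)
        · rw [if_neg hbl,
            show pvEndSpec loc n out.length = none from by
              simp only [pvEndSpec]; rw [if_neg (fun hx => hbl hx.2)]]
          simp only []
          rw [show n - out.length = (n - (out.length + 1)) + 1 from by omega,
            List.replicate_succ,
            show out ++ "O" :: List.replicate (n - (out.length + 1)) "O"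
              = (out ++ ["O"]) ++ List.replicate (n - (out.length + 1)) "O" from by simp]
          exact ih (n - (out.length + 1)) (by omega) (out.length + 1) (out ++ ["O"]) rfl
            (by omega) (by simp)
    · have hieq : out.length = n := by omega
      rw [pvALoop.eq_def, dif_neg hi, pvBLoop.eq_def, if_neg hi, hieq]
      simp

-- ===== VERDICT (by name: the statement is the Claim_ definition above) =====
theorem merge_iob_labels_spec : Claim_equal_merge_iob_labels := by
  intro tokens pers loc _ _
  unfold Spec_merge_iob_labels merge_iob_labels merge_iob_labels_alt
  have := pvLoop_eq pers loc tokens.length tokens.length 0 [] (by omega) (by omega) rfl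
  simpa using this
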